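-- pv_equiv track=rewrite | github.com/jedcn/pdf_text_replace | pdf_text_replace.py | _normalize_font
-- ===== SOURCE A (Python) =====
-- _SERIF_KEYWORDS = {"serif", "times", "georgia", "palatino", "garamond", "liberation serif"}
--
-- _MONO_KEYWORDS = {"mono", "courier", "code", "consolas", "menlo", "inconsolata"}
--
-- def _normalize_font(font_name):
--     lower = font_name.lower()
--     bold = "bold" in lower
--     italic = "italic" in lower or "oblique" in lower
--     is_serif = any(k in lower for k in _SERIF_KEYWORDS)
--     is_mono = any(k in lower for k in _MONO_KEYWORDS)
--
--     if is_mono: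
--         if bold and italic:
--             return "Courier-BoldOblique"
--         if bold:
--             return "Courier-Bold"
--         if italic:
--             return "Courier-Oblique"
--         return "Courier"
--     if is_serif:
--         if bold and italic:
--             return "Times-BoldItalic"
--         if bold:
--             return "Times-Bold"
--         if italic:
--             return "Times-Italic"
--         return "Times-Roman"
--     if bold and italic:
--         return "Helvetica-BoldOblique"
--     if bold:
--         return "Helvetica-Bold"
--     if italic:
--         return "Helvetica-Oblique"
--     return "Helvetica"
-- ===== SOURCE B (Python) =====
-- # Ordered (keyword, family) pairs: all mono keywords before serif keywords,
-- # so the first match reproduces A's mono > serif > default precedence.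
-- _FAMILY_KEYWORDS = [
--     ("mono", "Courier"), ("courier", "Courier"), ("code", "Courier"),
--     ("consolas", "Courier"), ("menlo", "Courier"), ("inconsolata", "Courier"),
--     ("serif", "Times"), ("times", "Times"), ("georgia", "Times"),
--     ("palatino", "Times"), ("garamond", "Times"), ("liberation serif", "Times"),
-- ]
--
-- def _normalize_font(font_name):
--     lower = font_name.lower()
--     family = next((fam for kw, fam in _FAMILY_KEYWORDS if kw in lower), "Helvetica")
--     suffix = "Bold" if "bold" in lower else ""
--     if "italic" in lower or "oblique" in lower:
--         suffix += "Italic" if family == "Times" else "Oblique"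
--     if suffix:
--         return family + "-" + suffix
--     return "Times-Roman" if family == "Times" else family
-- ===== Notes on version B (the rewrite author's own statement) =====
-- stated objective: alternative
-- what changed: Instead of selecting among 12 literal results in a nested if-tree, B finds the family as the first match in one ordered keyword->family list (mono pairs first, keeping A's precedence) and then COMPOSES the name from parts (family + '-' + 'Bold'/'Italic'/'Oblique' suffix, with 'Times-Roman' as the plain-serif special case).
import Mathlib
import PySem

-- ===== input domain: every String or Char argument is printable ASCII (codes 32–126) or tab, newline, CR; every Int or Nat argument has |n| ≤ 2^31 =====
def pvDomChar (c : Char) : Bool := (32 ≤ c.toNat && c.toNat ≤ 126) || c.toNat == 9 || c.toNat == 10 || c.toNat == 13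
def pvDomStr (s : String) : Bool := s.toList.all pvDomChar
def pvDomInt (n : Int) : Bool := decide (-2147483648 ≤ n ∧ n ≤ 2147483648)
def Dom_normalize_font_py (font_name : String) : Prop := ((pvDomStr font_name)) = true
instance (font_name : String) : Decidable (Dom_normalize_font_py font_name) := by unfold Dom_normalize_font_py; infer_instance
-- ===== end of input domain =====

-- B replaces A's 12-leaf nested if-tree by a first-match over one ordered keyword→family
-- list plus COMPOSING the result name from family and suffix parts (alternative decomposition).

-- ===== PORT A =====
def serifKeywords : List String := ["serif", "times", "georgia", "palatino", "garamond", "liberation serif"]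
def monoKeywords : List String := ["mono", "courier", "code", "consolas", "menlo", "inconsolata"]

def normalize_font_py (font_name : String) : String :=
  let lower := PySem.Str.lower font_name
  let bold := PySem.Str.isIn "bold" lower
  let italic := PySem.Str.isIn "italic" lower || PySem.Str.isIn "oblique" lower
  let is_serif := serifKeywords.any (fun k => PySem.Str.isIn k lower)
  let is_mono := monoKeywords.any (fun k => PySem.Str.isIn k lower)
  if is_mono then
    if bold && italic then "Courier-BoldOblique"
    else if bold then "Courier-Bold"
    else if italic then "Courier-Oblique"
    else "Courier"
  else if is_serif then
    if bold && italic then "Times-BoldItalic"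
    else if bold then "Times-Bold"
    else if italic then "Times-Italic"
    else "Times-Roman"
  else if bold && italic then "Helvetica-BoldOblique"
  else if bold then "Helvetica-Bold"
  else if italic then "Helvetica-Oblique"
  else "Helvetica"

-- ===== PORT B =====
-- ordered pairs: mono keywords first, so first match keeps mono > serif precedence
def familyKeywords : List (String × String) :=
  [("mono", "Courier"), ("courier", "Courier"), ("code", "Courier"),
   ("consolas", "Courier"), ("menlo", "Courier"), ("inconsolata", "Courier"),
   ("serif", "Times"), ("times", "Times"), ("georgia", "Times"),
   ("palatino", "Times"), ("garamond", "Times"), ("liberation serif", "Times")]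

def normalize_font_py_alt (font_name : String) : String :=
  let lower := PySem.Str.lower font_name
  let family := ((familyKeywords.find? (fun p => PySem.Str.isIn p.1 lower)).map Prod.snd).getD "Helvetica"
  let suffix0 := if PySem.Str.isIn "bold" lower then "Bold" else ""
  let suffix :=
    if PySem.Str.isIn "italic" lower || PySem.Str.isIn "oblique" lower then
      PySem.Str.join "" [suffix0, if family == "Times" then "Italic" else "Oblique"]
    else suffix0
  if suffix ≠ "" then PySem.Str.join "" [family, "-", suffix]
  else if family == "Times" then "Times-Roman" else family

-- ===== PRECONDITION & SPEC =====
def Spec_normalize_font_py (font_name : String) (out : String) : Prop := out = normalize_font_py_alt font_name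
instance (font_name : String) (out : String) : Decidable (Spec_normalize_font_py font_name out) := by unfold Spec_normalize_font_py; infer_instance

-- ===== CLAIM (what is proved, stated in full; the proofs are below) =====
def Claim_equal_normalize_font_py : Prop := ∀ (font_name : String), Dom_normalize_font_py font_name → Spec_normalize_font_py font_name (normalize_font_py font_name)

-- ===== LEMMAS AND PROOFS =====

-- B's first-match family equals A's precedence chain of the two any-tests
theorem family_eq (lower : String) :
    ((familyKeywords.find? (fun p => PySem.Str.isIn p.1 lower)).map Prod.snd).getD "Helvetica"
    = if monoKeywords.any (fun k => PySem.Str.isIn k lower) then "Courier"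
      else if serifKeywords.any (fun k => PySem.Str.isIn k lower) then "Times"
      else "Helvetica" := by
  have h : familyKeywords
      = monoKeywords.map (fun k => (k, "Courier")) ++ serifKeywords.map (fun k => (k, "Times")) := rfl
  rw [h, List.find?_append, List.find?_map, List.find?_map]
  have hc1 : ((fun p : String × String => PySem.Str.isIn p.1 lower) ∘ fun k => (k, "Courier"))
      = (fun k => PySem.Str.isIn k lower) := rfl
  have hc2 : ((fun p : String × String => PySem.Str.isIn p.1 lower) ∘ fun k => (k, "Times"))
      = (fun k => PySem.Str.isIn k lower) := rfl
  rw [hc1, hc2]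
  rcases hm : monoKeywords.find? (fun k => PySem.Str.isIn k lower) with _ | k
  · have hm' : monoKeywords.any (fun k => PySem.Str.isIn k lower) = false := by
      rw [List.any_eq_false]; intro x hx
      simpa using List.find?_eq_none.mp hm x hx
    rcases hs : serifKeywords.find? (fun k => PySem.Str.isIn k lower) with _ | k
    · have hs' : serifKeywords.any (fun k => PySem.Str.isIn k lower) = false := by
        rw [List.any_eq_false]; intro x hx
        simpa using List.find?_eq_none.mp hs x hx
      rw [hm', hs']; rfl
    · have hs' : serifKeywords.any (fun k => PySem.Str.isIn k lower) = true :=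
        List.any_eq_true.mpr ⟨k, List.mem_of_find?_eq_some hs,
          List.find?_some (p := fun k => PySem.Str.isIn k lower) hs⟩
      rw [hm', hs']; rfl
  · have hm' : monoKeywords.any (fun k => PySem.Str.isIn k lower) = true :=
      List.any_eq_true.mpr ⟨k, List.mem_of_find?_eq_some hm,
        List.find?_some (p := fun k => PySem.Str.isIn k lower) hm⟩
    rw [hm']; rfl

-- the nested branch tree equals composing the name from family and suffix parts
theorem tree_eq_compose (m s b i : Bool) :
    (if m then
      if b && i then "Courier-BoldOblique"
      else if b then "Courier-Bold"
      else if i then "Courier-Oblique"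
      else "Courier"
    else if s then
      if b && i then "Times-BoldItalic"
      else if b then "Times-Bold"
      else if i then "Times-Italic"
      else "Times-Roman"
    else if b && i then "Helvetica-BoldOblique"
    else if b then "Helvetica-Bold"
    else if i then "Helvetica-Oblique"
    else "Helvetica")
    = (let family := if m then "Courier" else if s then "Times" else "Helvetica"
       let suffix0 := if b then "Bold" else ""
       let suffix :=
         if i then PySem.Str.join "" [suffix0, if family == "Times" then "Italic" else "Oblique"]
         else suffix0
       if suffix ≠ "" then PySem.Str.join "" [family, "-", suffix]
       else if family == "Times" then "Times-Roman" else family) := by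
  cases m <;> cases s <;> cases b <;> cases i <;> decide

-- ===== VERDICT (by name: the statement is the Claim_ definition above) =====
theorem normalize_font_py_spec : Claim_equal_normalize_font_py := by
  intro fn _
  unfold Spec_normalize_font_py
  simp only [normalize_font_py, normalize_font_py_alt]
  rw [family_eq]
  exact tree_eq_compose _ _ _ _
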